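-- pv_equiv track=rewrite | github.com/brk-a/jikoni | 0-transform_string.py | solution
-- ===== SOURCE A (Python) =====
-- def solution(S):
--     changed = True
--
--     while changed:
--         changed = False
--         i = 0
--         while i < len(S) - 1:
--             if (S[i] == 'A' and S[i+1] == 'B') or (S[i] == 'B' and S[i+1] == 'A'):
--                 S = S[:i] + S[i+2:]
--                 changed = True
--             elif (S[i] == 'C' and S[i+1] == 'D') or (S[i] == 'D' and S[i+1] == 'C'):
--                 S = S[:i] + S[i+2:]
--                 changed = True
--             i += 1
--
--     return S
-- ===== SOURCE B (Python) =====
-- def solution(S):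
--     stack = []
--     for c in S:
--         if stack and ((stack[-1] == 'A' and c == 'B') or (stack[-1] == 'B' and c == 'A')
--                       or (stack[-1] == 'C' and c == 'D') or (stack[-1] == 'D' and c == 'C')):
--             stack.pop()
--         else:
--             stack.append(c)
--     return ''.join(stack)
-- ===== Notes on version B (the rewrite author's own statement) =====
-- stated objective: alternative
-- what changed: Replaces A's repeated full rescans with string re-slicing by a single pass that keeps a stack and pops when the top and the current character form a removable AB/BA/CD/DC pair.
import Mathlib
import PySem

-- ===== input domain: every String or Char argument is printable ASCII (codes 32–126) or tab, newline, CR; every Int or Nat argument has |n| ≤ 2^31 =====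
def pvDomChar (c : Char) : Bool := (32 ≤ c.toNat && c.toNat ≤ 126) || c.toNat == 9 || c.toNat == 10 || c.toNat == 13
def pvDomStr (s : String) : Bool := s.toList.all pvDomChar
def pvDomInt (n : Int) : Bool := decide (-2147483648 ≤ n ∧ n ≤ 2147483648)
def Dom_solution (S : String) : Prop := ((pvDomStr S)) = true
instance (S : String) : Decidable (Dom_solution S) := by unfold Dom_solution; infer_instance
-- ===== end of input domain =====

-- B replaces A's repeated rescan-and-reslice loop by a single stack pass; same return value.

-- ===== PORT A =====
-- Inner while loop of A over the characters of S (as List Char); i is a Nat since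
-- Python's i starts at 0 and only increments, so 'i < len(S) - 1' is the Nat test
-- 'i + 1 < s.length' (for len(S) = 0 Python's 'i < -1' is false, as is ours).
-- S[:i] + S[i+2:] is s.take i ++ s.drop (i+2), exact for these nonnegative indices.
-- 'gas' is only a totality guard (the loop runs at most len(S) - i more steps, and
-- gas starts at len(S) + 1); it never changes what is computed.
def solInnerGo : Nat → List Char → Nat → Bool → List Char × Bool
  | 0, s, _, c => (s, c)
  | gas + 1, s, i, c =>
    if h : i + 1 < s.length then
      if (s[i]'(by omega) = 'A' ∧ s[i+1]'h = 'B') ∨ (s[i]'(by omega) = 'B' ∧ s[i+1]'h = 'A') then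
        solInnerGo gas (s.take i ++ s.drop (i+2)) (i+1) true
      else if (s[i]'(by omega) = 'C' ∧ s[i+1]'h = 'D') ∨ (s[i]'(by omega) = 'D' ∧ s[i+1]'h = 'C') then
        solInnerGo gas (s.take i ++ s.drop (i+2)) (i+1) true
      else
        solInnerGo gas s (i+1) c
    else (s, c)

-- one full inner pass, starting at i = 0 with changed = False
def solInner (s : List Char) : List Char × Bool := solInnerGo (s.length + 1) s 0 false

-- A's outer 'while changed' loop; again gas (len + 1 suffices: each changed pass
-- shortens the string) is only a totality guard
def solOuterGo : Nat → List Char → List Char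
  | 0, s => s
  | gas + 1, s =>
      let r := solInner s
      if r.2 then solOuterGo gas r.1 else r.1

def solOuter (s : List Char) : List Char := solOuterGo (s.length + 1) s

def solution (S : String) : String := String.mk (solOuter S.toList)

-- ===== PORT B =====
-- 'stack[-1] pairs with c' test from Source B
def isPair (a b : Char) : Bool :=
  (a = 'A' ∧ b = 'B') ∨ (a = 'B' ∧ b = 'A') ∨ (a = 'C' ∧ b = 'D') ∨ (a = 'D' ∧ b = 'C')

-- one step of Source B's loop; the stack is kept top-first, so ''.join(stack) is the reverse
def pushc (st : List Char) (c : Char) : List Char :=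
  match st with
  | [] => [c]
  | t :: rest => if isPair t c then rest else c :: t :: rest

def solution_alt (S : String) : String :=
  String.mk (S.toList.foldl pushc []).reverse

-- ===== PRECONDITION & SPEC =====
def Spec_solution (S : String) (out : String) : Prop := out = solution_alt S
instance (S : String) (out : String) : Decidable (Spec_solution S out) := by unfold Spec_solution; infer_instance

-- ===== CLAIM (what is proved, stated in full; the proofs are below) =====
def Claim_equal_solution : Prop := ∀ (S : String), Dom_solution S → Spec_solution S (solution S)

-- ===== LEMMAS AND PROOFS =====

def nopair (a b : Char) : Prop := isPair a b = false

-- a stack produced by pushc never carries an adjacent removable pair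
def good (st : List Char) : Prop := List.IsChain nopair st

theorem isPair_symm (a b : Char) : isPair a b = isPair b a := by
  apply Bool.eq_iff_iff.mpr
  simp only [isPair, decide_eq_true_eq]
  tauto

-- each character's removable partner is unique
theorem isPair_unique (t a b : Char) (h1 : isPair t a = true) (h2 : isPair a b = true) : b = t := by
  simp only [isPair, decide_eq_true_eq] at h1 h2
  rcases h1 with ⟨h, h'⟩ | ⟨h, h'⟩ | ⟨h, h'⟩ | ⟨h, h'⟩ <;> subst h <;> subst h' <;>
    rcases h2 with ⟨h, h'⟩ | ⟨h, h'⟩ | ⟨h, h'⟩ | ⟨h, h'⟩ <;> simp_all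

theorem good_pushc (st : List Char) (c : Char) (h : good st) : good (pushc st c) := by
  match st with
  | [] => exact List.isChain_singleton c
  | t :: rest =>
      simp only [pushc]
      split
      · exact h.tail
      · rename_i hnp
        refine List.isChain_cons_cons.mpr ⟨?_, h⟩
        simp only [nopair]
        rw [isPair_symm]
        simpa using hnp

theorem good_foldl (l : List Char) : ∀ st, good st → good (l.foldl pushc st) := by
  induction l with
  | nil => intro st h; exact h
  | cons c l ih => intro st h; exact ih _ (good_pushc st c h)

-- cancellation: processing a removable pair leaves a good stack unchanged
theorem pushc_pair (st : List Char) (a b : Char) (hp : isPair a b = true) (hg : good st) :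
    pushc (pushc st a) b = st := by
  match st with
  | [] => simp [pushc, hp]
  | t :: rest =>
      simp only [pushc]
      by_cases hta : isPair t a = true
      · simp only [hta, if_true]
        have hbt : b = t := isPair_unique t a b hta hp
        subst hbt
        match rest with
        | [] => simp [pushc]
        | u :: rest' =>
            have hnu : nopair b u := (List.isChain_cons_cons.mp hg).1
            simp only [nopair] at hnu
            have : isPair u b = false := by rw [isPair_symm]; exact hnu
            simp [pushc, this]
      · simp only [hta]
        simp [pushc, hp]

theorem foldl_pair (v : List Char) (st : List Char) (a b : Char)
    (hp : isPair a b = true) (hg : good st) :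
    (a :: b :: v).foldl pushc st = v.foldl pushc st := by
  simp only [List.foldl_cons]
  rw [pushc_pair st a b hp hg]

-- removing a removable pair anywhere does not change the final stack
theorem foldl_remove (u v : List Char) (a b : Char) (hp : isPair a b = true) :
    (u ++ a :: b :: v).foldl pushc [] = (u ++ v).foldl pushc [] := by
  rw [List.foldl_append, List.foldl_append]
  exact foldl_pair v _ a b hp (good_foldl u [] List.isChain_nil)

-- a string with no adjacent removable pair is a fixpoint of the stack pass
theorem foldl_fix (s : List Char) : ∀ st, good st →
    (∀ t rest c s', st = t :: rest → s = c :: s' → nopair t c) →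
    List.IsChain nopair s → s.foldl pushc st = s.reverse ++ st := by
  induction s with
  | nil => intro st _ _ _; simp
  | cons c s' ih =>
      intro st hg hh hc
      have hstep : pushc st c = c :: st := by
        match st with
        | [] => simp [pushc]
        | t :: rest =>
            have := hh t rest c s' rfl rfl
            simp only [nopair] at this
            simp [pushc, this]
      simp only [List.foldl_cons, hstep]
      rw [ih (c :: st) ?_ ?_ hc.tail]
      · simp
      · match st with
        | [] => exact List.isChain_singleton c
        | t :: rest =>
            refine List.isChain_cons_cons.mpr ⟨?_, hg⟩
            have := hh t rest c s' rfl rfl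
            simp only [nopair] at this ⊢
            rw [isPair_symm]; exact this
      · intro t rest d s'' he hs
        cases he
        rw [hs] at hc
        exact (List.isChain_cons_cons.mp hc).1

-- decompose s at position i
theorem split_at (s : List Char) (i : Nat) (h : i + 1 < s.length) :
    s = s.take i ++ (s[i]'(by omega)) :: (s[i+1]'h) :: s.drop (i+2) := by
  conv_lhs => rw [← List.take_append_drop i s]
  congr 1
  rw [List.drop_eq_getElem_cons (show i < s.length by omega)]
  congr 1
  exact List.drop_eq_getElem_cons h

def fstk (s : List Char) : List Char := s.foldl pushc []

-- the inner pass preserves the final stack of its string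
theorem solInnerGo_fstk (g : Nat) : ∀ (s : List Char) (i : Nat) (c : Bool),
    fstk (solInnerGo g s i c).1 = fstk s := by
  induction g with
  | zero => intro s i c; rfl
  | succ g ih =>
      intro s i c
      rw [solInnerGo]
      split
      · rename_i h
        split
        · rename_i hp
          rw [ih]
          unfold fstk
          conv_rhs => rw [split_at s i h]
          rw [foldl_remove]
          simp only [isPair, decide_eq_true_eq]
          tauto
        · split
          · rename_i hp1 hp2
            rw [ih]
            unfold fstk
            conv_rhs => rw [split_at s i h]
            rw [foldl_remove]
            simp only [isPair, decide_eq_true_eq]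
            tauto
          · exact ih s (i+1) c
      · rfl

-- each inner pass either leaves (s, changed) untouched or removed something
theorem solInnerGo_spec (g : Nat) : ∀ (s : List Char) (i : Nat) (c : Bool),
    ((solInnerGo g s i c).2 = c ∧ (solInnerGo g s i c).1 = s) ∨
    ((solInnerGo g s i c).2 = true ∧ (solInnerGo g s i c).1.length < s.length) := by
  induction g with
  | zero => intro s i c; left; exact ⟨rfl, rfl⟩
  | succ g ih =>
      intro s i c
      rw [solInnerGo]
      split
      · rename_i h
        have hlen : (s.take i ++ s.drop (i+2)).length = s.length - 2 := by
          rw [List.length_append, List.length_take, List.length_drop]; omega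
        split
        · rcases ih (s.take i ++ s.drop (i+2)) (i+1) true with ⟨h1, h2⟩ | ⟨h1, h2⟩
          · right; refine ⟨h1, ?_⟩; rw [h2]; omega
          · right; refine ⟨h1, ?_⟩; omega
        · split
          · rcases ih (s.take i ++ s.drop (i+2)) (i+1) true with ⟨h1, h2⟩ | ⟨h1, h2⟩
            · right; refine ⟨h1, ?_⟩; rw [h2]; omega
            · right; refine ⟨h1, ?_⟩; omega
          · exact ih s (i+1) c
      · left; exact ⟨rfl, rfl⟩

theorem solInnerGo_true (g : Nat) (s : List Char) (i : Nat) : (solInnerGo g s i true).2 = true := by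
  rcases solInnerGo_spec g s i true with ⟨h, _⟩ | ⟨h, _⟩ <;> exact h

-- if a pass with enough gas reports no change, the scanned suffix has no removable pair
theorem solInnerGo_nochange (g : Nat) : ∀ (s : List Char) (i : Nat) (c : Bool),
    s.length ≤ g + i + 1 → (solInnerGo g s i c).2 = false →
    List.IsChain nopair (s.drop i) := by
  induction g with
  | zero =>
      intro s i c hg _
      have hlen : (s.drop i).length ≤ 1 := by simp; omega
      match hd : s.drop i with
      | [] => exact List.isChain_nil
      | [x] => exact List.isChain_singleton x
      | x :: y :: r => rw [hd] at hlen; simp at hlen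
  | succ g ih =>
      intro s i c hg hc
      rw [solInnerGo] at hc
      by_cases h : i + 1 < s.length
      · rw [dif_pos h] at hc
        by_cases hp1 : (s[i]'(by omega) = 'A' ∧ s[i+1]'h = 'B') ∨ (s[i]'(by omega) = 'B' ∧ s[i+1]'h = 'A')
        · rw [if_pos hp1, solInnerGo_true] at hc; simp at hc
        · rw [if_neg hp1] at hc
          by_cases hp2 : (s[i]'(by omega) = 'C' ∧ s[i+1]'h = 'D') ∨ (s[i]'(by omega) = 'D' ∧ s[i+1]'h = 'C')
          · rw [if_pos hp2, solInnerGo_true] at hc; simp at hc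
          · rw [if_neg hp2] at hc
            have htail := ih s (i+1) c (by omega) hc
            rw [List.drop_eq_getElem_cons (show i < s.length by omega)]
            rw [List.drop_eq_getElem_cons (show i + 1 < s.length by omega)] at htail ⊢
            refine List.isChain_cons_cons.mpr ⟨?_, htail⟩
            simp only [not_or] at hp1 hp2
            simp only [nopair, isPair]
            simp only [decide_eq_false_iff_not]
            tauto
      · have hlen : (s.drop i).length ≤ 1 := by simp; omega
        match hd : s.drop i with
        | [] => exact List.isChain_nil
        | [x] => exact List.isChain_singleton x
        | x :: y :: r => rw [hd] at hlen; simp at hlen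

-- the outer loop with enough gas: same final stack, and no removable pair left
theorem solOuterGo_spec (g : Nat) : ∀ (s : List Char), s.length < g →
    fstk (solOuterGo g s) = fstk s ∧ List.IsChain nopair (solOuterGo g s) := by
  induction g with
  | zero => intro s hg; omega
  | succ g ih =>
      intro s hg
      rw [solOuterGo]
      by_cases hr : (solInner s).2 = true
      · simp only [hr, if_true]
        have hlt : (solInner s).1.length < s.length := by
          rcases solInnerGo_spec (s.length + 1) s 0 false with ⟨h1, _⟩ | ⟨_, h2⟩
          · rw [show (solInnerGo (s.length+1) s 0 false).2 = (solInner s).2 from rfl, hr] at h1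
            simp at h1
          · exact h2
        obtain ⟨ih1, ih2⟩ := ih (solInner s).1 (by omega)
        refine ⟨?_, ih2⟩
        rw [ih1]
        exact solInnerGo_fstk (s.length + 1) s 0 false
      · simp only [hr, Bool.false_eq_true, if_false]
        have hc : (solInner s).2 = false := by simpa using hr
        rcases solInnerGo_spec (s.length + 1) s 0 false with ⟨_, h2⟩ | ⟨h1, _⟩
        · have hs : (solInner s).1 = s := h2
          constructor
          · rw [hs]
          · rw [hs]
            simpa using solInnerGo_nochange (s.length + 1) s 0 false (by omega) hc
        · rw [show (solInnerGo (s.length+1) s 0 false).2 = (solInner s).2 from rfl, hc] at h1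
          simp at h1

theorem solOuter_eq (s : List Char) : solOuter s = (fstk s).reverse := by
  obtain ⟨h1, h2⟩ := solOuterGo_spec (s.length + 1) s (by omega)
  have hfix := foldl_fix (solOuterGo (s.length + 1) s) [] List.isChain_nil
    (by intro t rest c s' he _; cases he) h2
  unfold fstk at h1
  rw [hfix, List.append_nil] at h1
  unfold solOuter fstk
  rw [← h1, List.reverse_reverse]

-- ===== VERDICT (by name: the statement is the Claim_ definition above) =====
theorem solution_spec : Claim_equal_solution := by
  intro S _
  unfold Spec_solution solution solution_alt
  rw [solOuter_eq]
  rfl
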